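-- pv_equiv track=rewrite | github.com/go2carter/AoC2019 | day1/fuel_counter_upper.py | fuel_for_module
-- ===== SOURCE A (Python) =====
-- def fuel_for_module(mass, include_fuel=False):
--     # 8 is cutoff for nonzero fuel requirement
--     if mass <= 8:
--         return 0
--     mass //= 3
--     fuel = mass - 2
--     if include_fuel:
--         added_fuel = fuel_for_module(fuel, include_fuel)
--         fuel += added_fuel
--     return fuel
-- ===== SOURCE B (Python) =====
-- def fuel_for_module(mass, include_fuel=False):
--     if mass <= 8:
--         return 0
--     current = mass // 3 - 2
--     total = current
--     if include_fuel:
--         while current > 8: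
--             current = current // 3 - 2
--             total += current
--     return total
-- ===== Notes on version B (the rewrite author's own statement) =====
-- stated objective: alternative
-- what changed: Replaces the recursion over the shrinking fuel chain with an explicit while-loop maintaining the current term and a running total.
import Mathlib
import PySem

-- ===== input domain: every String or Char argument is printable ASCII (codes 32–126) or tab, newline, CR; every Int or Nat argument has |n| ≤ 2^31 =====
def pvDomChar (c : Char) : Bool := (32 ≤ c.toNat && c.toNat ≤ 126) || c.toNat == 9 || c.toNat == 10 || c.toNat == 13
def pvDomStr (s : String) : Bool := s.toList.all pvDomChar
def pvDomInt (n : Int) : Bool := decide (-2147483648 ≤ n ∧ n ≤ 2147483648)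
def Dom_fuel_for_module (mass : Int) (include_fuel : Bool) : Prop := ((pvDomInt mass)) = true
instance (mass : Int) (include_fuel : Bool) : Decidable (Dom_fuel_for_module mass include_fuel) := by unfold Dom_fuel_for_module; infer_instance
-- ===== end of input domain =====

-- B replaces A's recursion over the shrinking fuel chain with an explicit while-loop keeping a running total (alternative decomposition, same cost).


-- ===== PORT A =====
def fuel_for_module (mass : Int) (include_fuel : Bool) : Int :=
  if mass ≤ 8 then 0
  else
    let mass' := PySem.Int.floordiv mass 3
    let fuel := mass' - 2
    if include_fuel then
      let added_fuel := fuel_for_module fuel include_fuel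
      fuel + added_fuel
    else fuel
termination_by mass.toNat
decreasing_by
  have := PySem.Int.floordiv_eq_ediv_of_pos (a := mass) (b := 3) (by omega)
  simp only [this]; omega

-- ===== PORT B =====
-- the while-loop of Source B: while current > 8: current = current // 3 - 2; total += current
def fuelLoop (current total : Int) : Int :=
  if current > 8 then
    fuelLoop (PySem.Int.floordiv current 3 - 2) (total + (PySem.Int.floordiv current 3 - 2))
  else total
termination_by current.toNat
decreasing_by
  have := PySem.Int.floordiv_eq_ediv_of_pos (a := current) (b := 3) (by omega)
  simp only [this]; omega

def fuel_for_module_alt (mass : Int) (include_fuel : Bool) : Int :=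
  if mass ≤ 8 then 0
  else
    let current := PySem.Int.floordiv mass 3 - 2
    let total := current
    if include_fuel then fuelLoop current total else total

-- ===== PRECONDITION & SPEC =====
def Spec_fuel_for_module (mass : Int) (include_fuel : Bool) (out : Int) : Prop := out = fuel_for_module_alt mass include_fuel
instance (mass : Int) (include_fuel : Bool) (out : Int) : Decidable (Spec_fuel_for_module mass include_fuel out) := by unfold Spec_fuel_for_module; infer_instance

-- ===== CLAIM (what is proved, stated in full; the proofs are below) =====
def Claim_equal_fuel_for_module : Prop := ∀ (mass : Int) (include_fuel : Bool), Dom_fuel_for_module mass include_fuel → Spec_fuel_for_module mass include_fuel (fuel_for_module mass include_fuel)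

-- ===== LEMMAS AND PROOFS =====
theorem fuelLoop_eq (current total : Int) :
    fuelLoop current total = total + fuel_for_module current true := by
  induction current, total using fuelLoop.induct with
  | case1 c t h ih =>
      rw [fuelLoop, if_pos h]
      conv_rhs => rw [fuel_for_module, if_neg (by omega : ¬ c ≤ 8), if_pos rfl]
      rw [ih]
      ring
  | case2 c t h =>
      rw [fuelLoop, if_neg h, fuel_for_module, if_pos (by omega : c ≤ 8)]
      ring

-- ===== VERDICT (by name: the statement is the Claim_ definition above) =====
theorem fuel_for_module_spec : Claim_equal_fuel_for_module := by
  intro mass include_fuel _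
  unfold Spec_fuel_for_module fuel_for_module fuel_for_module_alt
  by_cases h : mass ≤ 8
  · simp [h]
  · cases include_fuel with
    | false => simp [h]
    | true => simp [h, fuelLoop_eq]
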